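-- pv_equiv track=rewrite | github.com/Dencett/dencett | lesson_011/02_prime_numbers.py | prime_nonhypotenuse_numbers_generator
-- ===== SOURCE A (Python) =====
-- def prime_nonhypotenuse_numbers_generator(n):
--     prime_numbers = []
--     for number in range(1, n + 1):
--         cycle = True
--         for prime_1 in prime_numbers:
--             if cycle == True:
--                 for prime_2 in prime_numbers:
--                     if prime_1 ** 2 + prime_2 ** 2 == number ** 2:
--                         cycle = False
--                         prime_numbers.append(number)
--                         break
--             else:
--                 break
--         else:
--             prime_numbers.append(number)
--             yield number
-- ===== SOURCE B (Python) =====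
-- def prime_nonhypotenuse_numbers_generator(n):
--     # Two-pointer search a<=b per candidate c instead of A's nested scans over the
--     # ever-growing list: O(n^2) total instead of O(n^3).
--     for c in range(1, n + 1):
--         a, b = 1, c - 1
--         found = False
--         while a <= b and not found:
--             s = a * a + b * b
--             if s < c * c:
--                 a += 1
--             elif s > c * c:
--                 b -= 1
--             else:
--                 found = True
--         if not found:
--             yield c
-- ===== Notes on version B (the rewrite author's own statement) =====
-- stated objective: faster
-- what changed: Replaces A's quadratic membership test over the ever-growing list of all previous numbers (two nested scans per candidate) with a two-pointer sweep a<=b per candidate that decides in one linear pass whether c is the hypotenuse of a Pythagorean pair.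
import Mathlib
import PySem

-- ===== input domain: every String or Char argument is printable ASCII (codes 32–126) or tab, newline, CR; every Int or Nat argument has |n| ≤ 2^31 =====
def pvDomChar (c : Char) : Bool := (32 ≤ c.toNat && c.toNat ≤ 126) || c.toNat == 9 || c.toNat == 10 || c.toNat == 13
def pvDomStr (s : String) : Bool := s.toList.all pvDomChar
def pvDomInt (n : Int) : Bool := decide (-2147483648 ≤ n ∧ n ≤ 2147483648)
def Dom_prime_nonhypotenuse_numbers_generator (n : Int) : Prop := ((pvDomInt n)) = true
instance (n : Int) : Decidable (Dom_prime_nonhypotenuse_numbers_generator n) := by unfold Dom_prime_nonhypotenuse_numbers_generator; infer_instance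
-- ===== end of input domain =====

-- B replaces A's nested scans over the growing list of all previous numbers with a
-- two-pointer sweep per candidate; a timing run measured B faster.


-- ===== PORT A =====
-- inner 'for prime_2 in prime_numbers: if prime_1**2 + prime_2**2 == number**2: … break'
def pvFindL2 (primes : List Int) (c p1 : Int) : Bool :=
  match primes with
  | [] => false
  | p2 :: rest => if p1 ^ 2 + p2 ^ 2 == c ^ 2 then true else pvFindL2 rest c p1
-- outer 'for prime_1 in prime_numbers' with the 'cycle' flag: once the pair is found
-- (cycle = False) every later iteration takes the 'else: break' branch immediately, so the
-- loop is an early-exit scan.  (Python appends 'number' to prime_numbers mid-iteration in the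
-- found branch; the only extra elements are seen after cycle is already False, so iterating
-- over the snapshot is observationally identical.)
def pvFindL1 (todo primes : List Int) (c : Int) : Bool :=
  match todo with
  | [] => false
  | p1 :: rest => if pvFindL2 primes c p1 then true else pvFindL1 rest primes c
-- one iteration of 'for number in range(1, n+1)': both branches append number to
-- prime_numbers; only the for-else branch (no pair found) yields it
def pvStepA (st : List Int × List Int) (c : Int) : List Int × List Int :=
  if pvFindL1 st.1 st.1 c then (st.1 ++ [c], st.2) else (st.1 ++ [c], st.2 ++ [c])

def prime_nonhypotenuse_numbers_generator (n : Int) : List Int :=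
  ((PySem.List.pyRange 1 (n + 1) 1).foldl pvStepA ([], [])).2

-- ===== PORT B =====
-- 'while a <= b and not found: …' two-pointer loop; terminates since b - a shrinks
def pvHasPair (c a b : Int) : Bool :=
  if _h : a ≤ b then
    if a * a + b * b < c * c then pvHasPair c (a + 1) b
    else if a * a + b * b > c * c then pvHasPair c a (b - 1)
    else true
  else false
termination_by (b + 1 - a).toNat
decreasing_by all_goals omega

def pvStepB (out : List Int) (c : Int) : List Int :=
  if pvHasPair c 1 (c - 1) then out else out ++ [c]

def prime_nonhypotenuse_numbers_generator_alt (n : Int) : List Int :=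
  (PySem.List.pyRange 1 (n + 1) 1).foldl pvStepB []

-- ===== PRECONDITION & SPEC =====
def Spec_prime_nonhypotenuse_numbers_generator (n : Int) (out : List Int) : Prop := out = prime_nonhypotenuse_numbers_generator_alt n
instance (n : Int) (out : List Int) : Decidable (Spec_prime_nonhypotenuse_numbers_generator n out) := by unfold Spec_prime_nonhypotenuse_numbers_generator; infer_instance

-- ===== CLAIM (what is proved, stated in full; the proofs are below) =====
def Claim_equal_prime_nonhypotenuse_numbers_generator : Prop := ∀ (n : Int), Dom_prime_nonhypotenuse_numbers_generator n → Spec_prime_nonhypotenuse_numbers_generator n (prime_nonhypotenuse_numbers_generator n)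

-- ===== LEMMAS AND PROOFS =====
lemma pvFindL2_iff (primes : List Int) (c p1 : Int) :
    pvFindL2 primes c p1 = true ↔ ∃ p2 ∈ primes, p1 ^ 2 + p2 ^ 2 = c ^ 2 := by
  induction primes with
  | nil => simp [pvFindL2]
  | cons p2 rest ih =>
    simp only [pvFindL2, beq_iff_eq, List.mem_cons]
    split_ifs with h
    · simp only [true_iff]
      exact ⟨p2, Or.inl rfl, h⟩
    · rw [ih]
      constructor
      · rintro ⟨q, hq, he⟩; exact ⟨q, Or.inr hq, he⟩
      · rintro ⟨q, hq | hq, he⟩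
        · exact absurd (hq ▸ he) h
        · exact ⟨q, hq, he⟩

lemma pvFindL1_iff (todo primes : List Int) (c : Int) :
    pvFindL1 todo primes c = true ↔ ∃ p1 ∈ todo, ∃ p2 ∈ primes, p1 ^ 2 + p2 ^ 2 = c ^ 2 := by
  induction todo with
  | nil => simp [pvFindL1]
  | cons p1 rest ih =>
    simp only [pvFindL1, List.mem_cons]
    split_ifs with h
    · rw [pvFindL2_iff] at h
      simp only [true_iff]
      obtain ⟨q, hq, he⟩ := h
      exact ⟨p1, Or.inl rfl, q, hq, he⟩
    · rw [ih]
      rw [pvFindL2_iff] at h; push Not at h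
      constructor
      · rintro ⟨x, hx, y, hy, he⟩; exact ⟨x, Or.inr hx, y, hy, he⟩
      · rintro ⟨x, hx | hx, y, hy, he⟩
        · exact absurd he (hx ▸ h y hy)
        · exact ⟨x, hx, y, hy, he⟩

lemma pvHasPair_iff (c : Int) : ∀ (k : Nat) (a b : Int), (b + 1 - a).toNat = k → 1 ≤ a →
    (pvHasPair c a b = true ↔ ∃ x y : Int, a ≤ x ∧ x ≤ y ∧ y ≤ b ∧ x * x + y * y = c * c) := by
  intro k
  induction k using Nat.strong_induction_on with
  | _ k ih =>
    intro a b hk ha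
    rw [pvHasPair]
    split_ifs with hab hlt hgt
    · -- a ≤ b, a*a+b*b < c*c : no solution can have x = a
      rw [ih (b + 1 - (a + 1)).toNat (by omega) (a + 1) b rfl (by omega)]
      constructor
      · rintro ⟨x, y, h1, h2, h3, h4⟩; exact ⟨x, y, by omega, h2, h3, h4⟩
      · rintro ⟨x, y, h1, h2, h3, h4⟩
        refine ⟨x, y, ?_, h2, h3, h4⟩
        rcases lt_or_eq_of_le h1 with h | h
        · omega
        · exfalso; subst h
          have hyy : y * y ≤ b * b := by nlinarith
          nlinarith
    · -- a ≤ b, a*a+b*b > c*c : no solution can have y = b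
      rw [ih (b - 1 + 1 - a).toNat (by omega) a (b - 1) rfl ha]
      constructor
      · rintro ⟨x, y, h1, h2, h3, h4⟩; exact ⟨x, y, h1, h2, by omega, h4⟩
      · rintro ⟨x, y, h1, h2, h3, h4⟩
        refine ⟨x, y, h1, h2, ?_, h4⟩
        rcases lt_or_eq_of_le h3 with h | h
        · omega
        · exfalso; subst h
          have hxx : a * a ≤ x * x := by nlinarith
          nlinarith
    · simp only [true_iff]
      exact ⟨a, b, le_refl a, hab, le_refl b, by omega⟩
    · simp only [false_iff]; push Not
      intro x y h1 h2 h3; exfalso; omega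

-- at candidate c the accumulated list is exactly [1, …, c-1]; the two search strategies agree
lemma pvKeyStep (c : Int) :
    pvFindL1 (PySem.List.pyRange 1 c 1) (PySem.List.pyRange 1 c 1) c = pvHasPair c 1 (c - 1) := by
  rw [Bool.eq_iff_iff, pvFindL1_iff,
    pvHasPair_iff c (c - 1 + 1 - 1).toNat 1 (c - 1) rfl (le_refl 1)]
  simp only [PySem.List.mem_pyRange_one]
  constructor
  · rintro ⟨x, hx, y, hy, he⟩
    rw [pow_two, pow_two, pow_two] at he
    rcases le_total x y with h | h
    · exact ⟨x, y, hx.1, h, by omega, he⟩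
    · exact ⟨y, x, hy.1, h, by omega, by linarith⟩
  · rintro ⟨x, y, h1, h2, h3, h4⟩
    exact ⟨x, ⟨h1, by omega⟩, y, ⟨by omega, by omega⟩, by rw [pow_two, pow_two, pow_two]; omega⟩

lemma pvLoopEq : ∀ (k : Nat) (a : Int) (out : List Int), 1 ≤ a →
    ((PySem.List.pyRange a (a + k) 1).foldl pvStepA (PySem.List.pyRange 1 a 1, out)).2
      = (PySem.List.pyRange a (a + k) 1).foldl pvStepB out := by
  intro k
  induction k with
  | zero =>
    intro a out ha
    have h0 : PySem.List.pyRange a (a + ((0 : Nat) : Int)) 1 = [] :=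
      PySem.List.pyRange_one_eq_nil (by simp)
    rw [h0]
    rfl
  | succ m ih =>
    intro a out ha
    have hcons : PySem.List.pyRange a (a + ((m + 1 : Nat) : Int)) 1
        = a :: PySem.List.pyRange (a + 1) (a + ((m + 1 : Nat) : Int)) 1 :=
      PySem.List.pyRange_one_cons (by push_cast; omega)
    rw [hcons]
    simp only [List.foldl_cons]
    have hstep : pvStepA (PySem.List.pyRange 1 a 1, out) a
        = (PySem.List.pyRange 1 (a + 1) 1, pvStepB out a) := by
      simp only [pvStepA, pvStepB, pvKeyStep a,
        PySem.List.pyRange_one_succ_right (show (1:Int) ≤ a from ha)]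
      split_ifs <;> rfl
    rw [hstep]
    have harg : a + (↑(m + 1) : Int) = (a + 1) + ↑m := by push_cast; ring
    rw [harg]
    exact ih (a + 1) (pvStepB out a) (by omega)

-- ===== VERDICT (by name: the statement is the Claim_ definition above) =====
theorem prime_nonhypotenuse_numbers_generator_spec : Claim_equal_prime_nonhypotenuse_numbers_generator := by
  intro n _
  unfold Spec_prime_nonhypotenuse_numbers_generator
  unfold prime_nonhypotenuse_numbers_generator prime_nonhypotenuse_numbers_generator_alt
  by_cases h : n ≤ 0
  · rw [PySem.List.pyRange_one_eq_nil (by omega)]; rfl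
  · push Not at h
    have hn : n + 1 = 1 + (n.toNat : Int) := by omega
    rw [hn]
    have := pvLoopEq n.toNat 1 [] (le_refl 1)
    rw [PySem.List.pyRange_one_eq_nil (le_refl 1)] at this
    exact this
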